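-- pv_equiv track=rewrite | github.com/cjhutto/bsd | bsdetector/bias.py | count_liwc_list_freq
-- ===== SOURCE A (Python) =====
-- def count_liwc_list_freq(liwc_list, words_list):
--     cnt = 0
--     for w in words_list:
--         if w in liwc_list:
--             cnt += 1
--         for lw in liwc_list:
--             if str(lw).endswith('*') and str(w).startswith(lw):
--                 cnt += 1
--     return cnt
-- ===== SOURCE B (Python) =====
-- def count_liwc_list_freq(liwc_list, words_list):
--     # One-pass index: a set for exact membership, a Counter of starred entries;
--     # per word, look up each of its prefixes in the counter (no inner scan of liwc_list).
--     exact = set(liwc_list)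
--     starred = {}
--     for lw in liwc_list:
--         if str(lw).endswith('*'):
--             starred[lw] = starred.get(lw, 0) + 1
--     cnt = 0
--     for w in words_list:
--         if w in exact:
--             cnt += 1
--         s = str(w)
--         for k in range(len(s) + 1):
--             cnt += starred.get(s[:k], 0)
--     return cnt
-- ===== Notes on version B (the rewrite author's own statement) =====
-- stated objective: faster
-- what changed: Replaces A's per-word inner scan of liwc_list by a precomputed membership set plus a Counter of starred entries looked up at each prefix of the word, so the cost per word depends on the word length instead of the lexicon size.
import Mathlib
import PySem

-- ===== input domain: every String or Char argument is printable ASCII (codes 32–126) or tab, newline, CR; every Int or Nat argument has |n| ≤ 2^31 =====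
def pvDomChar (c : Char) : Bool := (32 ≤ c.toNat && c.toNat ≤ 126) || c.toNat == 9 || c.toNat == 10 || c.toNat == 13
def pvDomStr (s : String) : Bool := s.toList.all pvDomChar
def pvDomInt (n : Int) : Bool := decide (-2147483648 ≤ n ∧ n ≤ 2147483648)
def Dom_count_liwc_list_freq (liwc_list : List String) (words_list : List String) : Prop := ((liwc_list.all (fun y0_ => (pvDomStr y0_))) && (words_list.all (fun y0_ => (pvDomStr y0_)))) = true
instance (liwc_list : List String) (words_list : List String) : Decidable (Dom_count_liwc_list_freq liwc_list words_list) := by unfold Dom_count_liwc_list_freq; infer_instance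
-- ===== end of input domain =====

-- B replaces A's inner scan of liwc_list per word by a precomputed set (exact matches) plus a
-- counter of starred entries looked up at every prefix of the word (objective: faster).

-- ===== PORT A =====
def count_liwc_list_freq (liwc_list : List String) (words_list : List String) : Int :=
  words_list.foldl (fun cnt w =>
    let cnt := if liwc_list.contains w then cnt + 1 else cnt
    liwc_list.foldl (fun c lw =>
      if PySem.Str.endswith lw "*" && PySem.Str.startswith w lw then c + 1 else c) cnt) 0

-- ===== PORT B =====
def count_liwc_list_freq_alt (liwc_list : List String) (words_list : List String) : Int :=
  let exact : PySem.Set String := PySem.Set.ofList liwc_list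
  let starred : PySem.Dict String Int :=
    liwc_list.foldl (fun d lw =>
      if PySem.Str.endswith lw "*" then d.insert lw (d.getD lw 0 + 1) else d) PySem.Dict.empty
  words_list.foldl (fun cnt w =>
    let cnt := if PySem.Set.contains exact w then cnt + 1 else cnt
    (List.range (w.toList.length + 1)).foldl (fun c k =>
      c + starred.getD (String.ofList (w.toList.take k)) 0) cnt) 0

-- ===== PRECONDITION & SPEC =====
def Spec_count_liwc_list_freq (liwc_list : List String) (words_list : List String) (out : Int) : Prop := out = count_liwc_list_freq_alt liwc_list words_list
instance (liwc_list : List String) (words_list : List String) (out : Int) : Decidable (Spec_count_liwc_list_freq liwc_list words_list out) := by unfold Spec_count_liwc_list_freq; infer_instance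

-- ===== CLAIM (what is proved, stated in full; the proofs are below) =====
def Claim_equal_count_liwc_list_freq : Prop := ∀ (liwc_list : List String) (words_list : List String), Dom_count_liwc_list_freq liwc_list words_list → Spec_count_liwc_list_freq liwc_list words_list (count_liwc_list_freq liwc_list words_list)

-- ===== LEMMAS AND PROOFS =====

-- counting, over a list with a duplicate-free cons head p :: ps, splits off the count of p
theorem countP_contains_cons (xs ps : List String) (p : String) (hp : p ∉ ps) :
    xs.countP (fun x => (p :: ps).contains x) = xs.count p + xs.countP (fun x => ps.contains x) := by
  induction xs with
  | nil => simp
  | cons x xs ih =>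
    simp only [List.countP_cons, List.count_cons]
    rw [ih]
    by_cases h : x = p <;> by_cases hm : x ∈ ps <;> simp_all <;> omega

-- summing, over a duplicate-free list of keys ps, the multiplicity of each key in xs
-- counts exactly the elements of xs that lie in ps
theorem sum_count_of_nodup (xs ps : List String) (h : ps.Nodup) :
    (ps.map (fun p => (xs.count p : Int))).sum = (xs.countP (fun x => ps.contains x) : Int) := by
  induction ps with
  | nil => simp
  | cons p ps ih =>
    rcases List.nodup_cons.mp h with ⟨hp, hnd⟩
    rw [List.map_cons, List.sum_cons, ih hnd, countP_contains_cons xs ps p hp]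
    push_cast; ring

-- the list of all prefixes of w (as strings) characterises startswith …
theorem mem_prefixes_iff (w lw : String) :
    lw ∈ (List.range (w.toList.length + 1)).map (fun k => String.ofList (w.toList.take k)) ↔
      PySem.Str.startswith w lw = true := by
  simp only [PySem.Str.startswith_eq, PySem.Chars.startswith_iff, List.mem_map, List.mem_range]
  constructor
  · rintro ⟨k, _, rfl⟩
    simpa using List.take_prefix k w.toList
  · intro hpre
    refine ⟨lw.toList.length, ?_, ?_⟩
    · have := hpre.length_le; omega
    · rw [← List.prefix_iff_eq_take.mp hpre]
      simp

-- … and is duplicate-free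
theorem prefixes_nodup (w : String) :
    ((List.range (w.toList.length + 1)).map (fun k => String.ofList (w.toList.take k))).Nodup := by
  apply List.Nodup.map_on _ (List.nodup_range)
  intro k hk j hj heq
  have h : w.toList.take k = w.toList.take j := by
    have := congrArg String.toList heq
    simpa using this
  have hlen := congrArg List.length h
  simp [List.length_take] at hlen
  simp [List.mem_range] at hk hj
  omega

-- per-word: A's inner scan of liwc_list equals B's prefix lookups in the starred counter
theorem inner_eq (liwc_list : List String) (w : String) (c : Int) :
    liwc_list.foldl (fun c lw =>
      if PySem.Str.endswith lw "*" && PySem.Str.startswith w lw then c + 1 else c) c =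
    (List.range (w.toList.length + 1)).foldl (fun c k =>
      c + (liwc_list.foldl (fun d lw =>
        if PySem.Str.endswith lw "*" then d.insert lw (d.getD lw 0 + 1) else d)
        PySem.Dict.empty).getD (String.ofList (w.toList.take k)) 0) c := by
  rw [PySem.List.foldl_if_add_one]
  simp only [PySem.List.foldl_if_eq_foldl_filter (p := fun lw => PySem.Str.endswith lw "*")
      (f := fun (d : PySem.Dict String Int) lw => d.insert lw (d.getD lw 0 + 1)),
      PySem.Dict.foldl_insert_getD_add_one_eq_counter]
  rw [PySem.List.foldl_add
      (g := fun k => (PySem.Dict.counter (liwc_list.filter (fun lw => PySem.Str.endswith lw "*"))).getD (String.ofList (w.toList.take k)) 0)]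
  congr 1
  have hmap : (List.range (w.toList.length + 1)).map
      (fun k => (PySem.Dict.counter (liwc_list.filter (fun lw => PySem.Str.endswith lw "*"))).getD (String.ofList (w.toList.take k)) 0)
      = ((List.range (w.toList.length + 1)).map (fun k => String.ofList (w.toList.take k))).map
        (fun p => ((liwc_list.filter (fun lw => PySem.Str.endswith lw "*")).count p : Int)) := by
    rw [List.map_map]
    refine List.map_congr_left ?_
    intro k _
    simp [PySem.Dict.getD_counter]
  rw [hmap, sum_count_of_nodup _ _ (prefixes_nodup w)]
  have hcp : (liwc_list.filter (fun lw => PySem.Str.endswith lw "*")).countP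
      (fun x => (((List.range (w.toList.length + 1)).map (fun k => String.ofList (w.toList.take k)))).contains x)
      = (liwc_list.filter (fun lw => PySem.Str.endswith lw "*")).countP (fun lw => PySem.Str.startswith w lw) := by
    refine List.countP_congr ?_
    intro x _
    rw [List.contains_iff_mem]
    exact mem_prefixes_iff w x
  rw [hcp, List.countP_filter]
  congr 1
  refine List.countP_congr ?_
  intro x _
  simp [Bool.and_comm]

-- ===== VERDICT (by name: the statement is the Claim_ definition above) =====
theorem count_liwc_list_freq_spec : Claim_equal_count_liwc_list_freq := by
  intro liwc words _
  unfold Spec_count_liwc_list_freq count_liwc_list_freq count_liwc_list_freq_alt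
  simp only
  apply PySem.List.foldl_congr_mem
  intro cnt w _
  have hc : PySem.Set.contains (PySem.Set.ofList liwc) w = liwc.contains w := by
    simp [PySem.Set.contains, PySem.Set.mem_ofList]
  rw [hc]
  exact inner_eq liwc w _
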